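-- pv_equiv track=rewrite | github.com/DaryaStrakhova/2020-2-level-labs | lab_2/main.py | find_diff_in_sentence
-- ===== SOURCE A (Python) =====
-- def find_diff_in_sentence(original_sentence_tokens: tuple, suspicious_sentence_tokens: tuple, lcs: tuple) -> tuple:
--     """
--     Finds words not present in lcs.
--     :param original_sentence_tokens: a tuple of tokens
--     :param suspicious_sentence_tokens: a tuple of tokens
--     :param lcs: a longest common subsequence
--     :return: a tuple with tuples of indexes
--     """
--     orig_sent_type = not isinstance(original_sentence_tokens, tuple)
--     susp_sent_type = not isinstance(suspicious_sentence_tokens, tuple)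
--     lcs_type = not isinstance(lcs, tuple)
--
--     if orig_sent_type or susp_sent_type or lcs_type:
--         return ()
--     for function_parameter in (original_sentence_tokens, suspicious_sentence_tokens, lcs):
--         if isinstance(function_parameter, tuple):
--             if not all(isinstance(word, str) for word in function_parameter):
--                 return ()
--
--     diff_sum = []
--     sentences = (original_sentence_tokens, suspicious_sentence_tokens)
--
--     for sentence in sentences:
--         diff = []
--         for i, token in enumerate(sentence):
--             if token not in lcs:
--                 if i == 0 or sentence[i - 1] in lcs:
--                     diff.append(i)
--                 if i == len(sentence) - 1 or sentence[i + 1] in lcs: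
--                     diff.append(i + 1)
--         diff_sum.append(tuple(diff))
--
--     return tuple(diff_sum)
-- ===== SOURCE B (Python) =====
-- def find_diff_in_sentence(original_sentence_tokens: tuple, suspicious_sentence_tokens: tuple, lcs: tuple) -> tuple:
--     """
--     Finds words not present in lcs, reported as maximal runs of consecutive
--     non-lcs tokens: for each run covering indices [start, end] the flat diff
--     list receives start and end + 1.
--     """
--     orig_sent_type = not isinstance(original_sentence_tokens, tuple)
--     susp_sent_type = not isinstance(suspicious_sentence_tokens, tuple)
--     lcs_type = not isinstance(lcs, tuple)
--
--     if orig_sent_type or susp_sent_type or lcs_type: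
--         return ()
--     for function_parameter in (original_sentence_tokens, suspicious_sentence_tokens, lcs):
--         if isinstance(function_parameter, tuple):
--             if not all(isinstance(word, str) for word in function_parameter):
--                 return ()
--
--     def runs(sentence):
--         diff = []
--         start = None
--         for i, token in enumerate(sentence):
--             if token in lcs:
--                 if start is not None:
--                     diff.append(start)
--                     diff.append(i)
--                     start = None
--             else:
--                 if start is None:
--                     start = i
--         if start is not None:
--             diff.append(start)
--             diff.append(len(sentence))
--         return tuple(diff)
--
--     return (runs(original_sentence_tokens), runs(suspicious_sentence_tokens))
-- ===== Notes on version B (the rewrite author's own statement) =====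
-- stated objective: alternative
-- what changed: B replaces A's per-token left/right-neighbour membership tests with run segmentation: a single pass tracking the start index of the current maximal non-lcs run and emitting (start, end+1) when the run closes.
import Mathlib
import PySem

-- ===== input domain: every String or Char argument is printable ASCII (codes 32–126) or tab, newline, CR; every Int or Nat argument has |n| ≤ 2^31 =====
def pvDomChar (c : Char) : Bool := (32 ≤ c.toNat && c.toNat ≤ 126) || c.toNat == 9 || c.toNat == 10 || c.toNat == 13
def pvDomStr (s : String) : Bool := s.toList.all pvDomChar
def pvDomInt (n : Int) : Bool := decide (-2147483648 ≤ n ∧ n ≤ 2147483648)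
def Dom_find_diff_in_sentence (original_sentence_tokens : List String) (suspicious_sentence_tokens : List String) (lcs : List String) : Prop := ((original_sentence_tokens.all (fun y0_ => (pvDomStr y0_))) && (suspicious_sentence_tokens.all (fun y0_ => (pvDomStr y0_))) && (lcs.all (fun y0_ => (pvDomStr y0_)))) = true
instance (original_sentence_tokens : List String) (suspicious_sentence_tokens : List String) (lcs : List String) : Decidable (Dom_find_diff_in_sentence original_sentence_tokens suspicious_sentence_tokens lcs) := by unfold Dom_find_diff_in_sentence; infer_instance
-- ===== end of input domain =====

-- B reports the non-lcs tokens as maximal contiguous runs (one pass tracking the current run's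
-- start index) instead of A's per-token left/right-neighbour membership tests; same flat
-- (start, end+1) output. Under the Lean types the isinstance/str type-validation preamble of
-- both Pythons always passes (every argument IS a sequence of strings), so the ports omit it.

-- ===== PORT A =====
-- loop body of A's 'for i, token in enumerate(sentence)'; pyGetD's default "" is never
-- consulted: whenever the membership disjunct decides the ∨, the other disjunct is already
-- true (Python's short-circuit 'or' guards the index), so the ∨'s value is Python's.
def pvStepA (lcs : List String) (sentence : List String) (diff : List Int) (it : Int × String) : List Int :=
  if it.2 ∉ lcs then
    let diff1 := if it.1 = 0 ∨ PySem.List.pyGetD sentence (it.1 - 1) "" ∈ lcs then diff ++ [it.1] else diff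
    if it.1 = (sentence.length : Int) - 1 ∨ PySem.List.pyGetD sentence (it.1 + 1) "" ∈ lcs then diff1 ++ [it.1 + 1] else diff1
  else diff

def find_diff_in_sentence (original_sentence_tokens : List String) (suspicious_sentence_tokens : List String) (lcs : List String) : List (List Int) :=
  let diffFor := fun (sentence : List String) =>
    (PySem.List.enumerate sentence 0).foldl (pvStepA lcs sentence) []
  [diffFor original_sentence_tokens, diffFor suspicious_sentence_tokens]

-- ===== PORT B =====
-- B's 'runs' loop: index i, current run's start (none = not inside a run), accumulated diff;
-- the trailing 'if start is not None' epilogue of Source B is the [] base case.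
def pvRunsB (lcs : List String) : List String → Int → Option Int → List Int → List Int
  | [], i, start, diff =>
      match start with
      | none => diff
      | some st => diff ++ [st, i]
  | token :: rest, i, start, diff =>
      if token ∈ lcs then
        match start with
        | none => pvRunsB lcs rest (i + 1) none diff
        | some st => pvRunsB lcs rest (i + 1) none (diff ++ [st, i])
      else
        match start with
        | none => pvRunsB lcs rest (i + 1) (some i) diff
        | some st => pvRunsB lcs rest (i + 1) (some st) diff

def find_diff_in_sentence_alt (original_sentence_tokens : List String) (suspicious_sentence_tokens : List String) (lcs : List String) : List (List Int) :=
  [pvRunsB lcs original_sentence_tokens 0 none [], pvRunsB lcs suspicious_sentence_tokens 0 none []]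

-- ===== PRECONDITION & SPEC =====
def Spec_find_diff_in_sentence (original_sentence_tokens : List String) (suspicious_sentence_tokens : List String) (lcs : List String) (out : List (List Int)) : Prop := out = find_diff_in_sentence_alt original_sentence_tokens suspicious_sentence_tokens lcs
instance (original_sentence_tokens : List String) (suspicious_sentence_tokens : List String) (lcs : List String) (out : List (List Int)) : Decidable (Spec_find_diff_in_sentence original_sentence_tokens suspicious_sentence_tokens lcs out) := by unfold Spec_find_diff_in_sentence; infer_instance

-- ===== CLAIM (what is proved, stated in full; the proofs are below) =====
def Claim_equal_find_diff_in_sentence : Prop := ∀ (original_sentence_tokens : List String) (suspicious_sentence_tokens : List String) (lcs : List String), Dom_find_diff_in_sentence original_sentence_tokens suspicious_sentence_tokens lcs → Spec_find_diff_in_sentence original_sentence_tokens suspicious_sentence_tokens lcs (find_diff_in_sentence original_sentence_tokens suspicious_sentence_tokens lcs)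

-- ===== LEMMAS AND PROOFS =====

-- 'previous token (last of the prefix) is in lcs, or there is none' — A's first ∨ at index |pre|
def pvPrevIn (lcs : List String) (pre : List String) : Bool :=
  match pre.getLast? with
  | none => true
  | some p => decide (p ∈ lcs)

-- 'next token (head of the remaining suffix) is in lcs, or there is none' — A's second ∨
def pvHeadIn (lcs : List String) (l : List String) : Bool :=
  match l.head? with
  | none => true
  | some u => decide (u ∈ lcs)

-- A's loop rewritten as a structural recursion carrying the neighbour information locally
def pvGoA (lcs : List String) : Bool → List String → Int → List Int → List Int
  | _, [], _, acc => acc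
  | prevIn, token :: rest, i, acc =>
      if token ∈ lcs then pvGoA lcs true rest (i + 1) acc
      else
        let acc1 := if prevIn then acc ++ [i] else acc
        let acc2 := if pvHeadIn lcs rest then acc1 ++ [i + 1] else acc1
        pvGoA lcs false rest (i + 1) acc2

-- A's first condition at index |pre| of sentence pre ++ t :: rest is 'last of pre in lcs, or pre empty'
lemma pvCond1 (lcs pre rest : List String) (t : String) :
    ((pre.length : Int) = 0 ∨ PySem.List.pyGetD (pre ++ t :: rest) ((pre.length : Int) - 1) "" ∈ lcs)
      ↔ pvPrevIn lcs pre = true := by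
  rcases pre.eq_nil_or_concat with rfl | ⟨pre', p, rfl⟩
  · simp [pvPrevIn]
  · simp only [List.concat_eq_append]
    have h2 : (((pre' ++ [p]).length : Int)) - 1 = ((pre'.length : Nat) : Int) := by
      simp
    rw [h2]
    have h3 : PySem.List.pyGetD ((pre' ++ [p]) ++ t :: rest) ((pre'.length : Nat) : Int) "" = p := by
      rw [PySem.List.pyGetD_natCast]
      simp [List.getD, List.append_assoc]
    rw [h3]
    simp [pvPrevIn]
    intro h
    exact (by omega : False).elim

-- A's second condition at index |pre| is 'head of rest in lcs, or rest empty'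
lemma pvCond2 (lcs pre rest : List String) (t : String) :
    ((pre.length : Int) = ((pre ++ t :: rest).length : Int) - 1 ∨ PySem.List.pyGetD (pre ++ t :: rest) ((pre.length : Int) + 1) "" ∈ lcs)
      ↔ pvHeadIn lcs rest = true := by
  cases rest with
  | nil => simp [pvHeadIn]
  | cons u rest' =>
    have h2 : PySem.List.pyGetD (pre ++ t :: u :: rest') ((pre.length : Int) + 1) "" = u := by
      have he : ((pre.length : Int) + 1) = (((pre ++ [t]).length : Nat) : Int) := by simp
      rw [he, PySem.List.pyGetD_natCast]
      have : pre ++ t :: u :: rest' = (pre ++ [t]) ++ u :: rest' := by simp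
      rw [this]
      simp [List.getD]
    rw [h2]
    simp [pvHeadIn]
    intro h
    exact (by omega : False).elim

-- bridge: A's indexed enumerate-fold over the suffix l of sentence = pre ++ l equals pvGoA
lemma pvBridgeA (lcs : List String) (l : List String) : ∀ (pre : List String) (acc : List Int),
    (PySem.List.enumerate l (pre.length : Int)).foldl (pvStepA lcs (pre ++ l)) acc
      = pvGoA lcs (pvPrevIn lcs pre) l (pre.length : Int) acc := by
  induction l with
  | nil => intro pre acc; simp [PySem.List.enumerate_nil, pvGoA]
  | cons t rest ih =>
    intro pre acc
    rw [PySem.List.enumerate_cons]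
    simp only [List.foldl_cons]
    have hsent : pre ++ t :: rest = (pre ++ [t]) ++ rest := by simp
    have hlen : (pre.length : Int) + 1 = (((pre ++ [t]).length : Nat) : Int) := by simp
    by_cases ht : t ∈ lcs
    · have hstep : pvStepA lcs (pre ++ t :: rest) acc ((pre.length : Int), t) = acc := by
        simp [pvStepA, ht]
      have hprev : pvPrevIn lcs (pre ++ [t]) = true := by simp [pvPrevIn, ht]
      rw [hstep, hlen, hsent, ih (pre ++ [t]), hprev, ← hlen]
      simp only [pvGoA]
      rw [if_pos ht]
    · have hstep : pvStepA lcs (pre ++ t :: rest) acc ((pre.length : Int), t)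
          = (if pvHeadIn lcs rest
             then (if pvPrevIn lcs pre then acc ++ [(pre.length : Int)] else acc) ++ [(pre.length : Int) + 1]
             else (if pvPrevIn lcs pre then acc ++ [(pre.length : Int)] else acc)) := by
        simp only [pvStepA, ht, not_false_iff, if_pos]
        simp only [pvCond1 lcs pre rest t, pvCond2 lcs pre rest t]
      have hprev : pvPrevIn lcs (pre ++ [t]) = false := by simp [pvPrevIn, ht]
      rw [hstep, hlen, hsent, ih (pre ++ [t]), hprev, ← hlen]
      simp only [pvGoA]
      rw [if_neg ht]

-- coupling: pvGoA (outside a run / inside a run started at st) against B's run recursion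
lemma pvCouple (lcs : List String) (l : List String) :
    (∀ (i : Int) (acc : List Int), pvGoA lcs true l i acc = pvRunsB lcs l i none acc) ∧
    (∀ (i : Int) (acc : List Int) (st : Int),
      pvGoA lcs false l i (acc ++ [st] ++ (if pvHeadIn lcs l then [i] else [])) = pvRunsB lcs l i (some st) acc) := by
  induction l with
  | nil =>
    constructor
    · intro i acc; simp [pvGoA, pvRunsB]
    · intro i acc st; simp [pvGoA, pvRunsB, pvHeadIn]
  | cons u rest ih =>
    constructor
    · intro i acc
      by_cases hu : u ∈ lcs
      · simp only [pvGoA, pvRunsB, if_pos hu]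
        exact ih.1 (i + 1) acc
      · have h := ih.2 (i + 1) acc i
        simp only [pvGoA, pvRunsB, if_neg hu]
        cases hh : pvHeadIn lcs rest <;>
          simp only [hh] at h ⊢ <;> simpa using h
    · intro i acc st
      by_cases hu : u ∈ lcs
      · have hh : pvHeadIn lcs (u :: rest) = true := by simp [pvHeadIn, hu]
        rw [hh]
        have h := ih.1 (i + 1) (acc ++ [st, i])
        simp only [pvGoA, pvRunsB, if_pos hu]
        simpa using h
      · have hh : pvHeadIn lcs (u :: rest) = false := by simp [pvHeadIn, hu]
        rw [hh]
        have h := ih.2 (i + 1) acc st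
        simp only [pvGoA, pvRunsB, if_neg hu]
        cases hh2 : pvHeadIn lcs rest <;>
          simp only [hh2] at h ⊢ <;> simpa using h

-- per-sentence equality of the two inner loops
lemma pvSentence (lcs sentence : List String) :
    (PySem.List.enumerate sentence 0).foldl (pvStepA lcs sentence) [] = pvRunsB lcs sentence 0 none [] := by
  have h := pvBridgeA lcs sentence [] []
  simpa [pvPrevIn] using h.trans ((pvCouple lcs sentence).1 0 [])

-- ===== VERDICT (by name: the statement is the Claim_ definition above) =====
theorem find_diff_in_sentence_spec : Claim_equal_find_diff_in_sentence := by
  intro o s lcs _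
  unfold Spec_find_diff_in_sentence find_diff_in_sentence find_diff_in_sentence_alt
  simp [pvSentence]
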